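-- pv_equiv track=rewrite | github.com/midstar/AoC | 2024/04A.py | solve
-- ===== SOURCE A (Python) =====
-- key = "XMAS"
--
-- def cnt(s):
--     result = 0
--     for i in range(len(s)):
--         if s[i:].startswith(key): result += 1
--     return result
--
-- def cnt_2dir(row):
--     s = ''.join(row)
--     return cnt(s) + cnt(s[::-1])
--
-- def transpose(matrix):
--     tmatrix = []
--     for col in range(len(matrix[0])):
--         tmatrix.append([row[col] for row in matrix])
--     return tmatrix
--
-- def diagrow(matrix, sr, sc, to_right):
--     result = []
--     while(sr >= 0 and sr < len(matrix) and sc >= 0 and sc < (len(matrix[0]))):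
--         result.append(matrix[sr][sc])
--         sr += 1
--         sc = sc + 1 if to_right else sc - 1
--     return result
--
-- def diagr(matrix):
--     result = []
--     for c in range(len(matrix[0])):
--         result.append(diagrow(matrix,0,c,True))
--     for r in range(1, len(matrix)):
--         result.append(diagrow(matrix,r,0,True))
--     return result
--
-- def diagl(matrix):
--     result = []
--     for c in range(len(matrix[0])):
--         result.append(diagrow(matrix,0,c,False))
--     for r in range(1, len(matrix)):
--         result.append(diagrow(matrix,r,len(matrix[r]) - 1,False))
--     return result
--
-- def solve(input):
--     matrix = [[c for c in line] for line in input.splitlines()]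
--     result = 0
--
--     # Horizontal
--     result += sum([cnt_2dir(row) for row in matrix])
--
--     # Vertical
--     result += sum([cnt_2dir(row) for row in transpose(matrix)])
--
--     # Diagonal right
--     result += sum([cnt_2dir(row) for row in diagr(matrix)])
--
--     # Diagonal left
--     result += sum([cnt_2dir(row) for row in diagl(matrix)])
--
--     return result
-- ===== SOURCE B (Python) =====
-- key = "XMAS"
--
-- def solve(input):
--     grid = input.splitlines()
--     m = len(grid)
--     n = len(grid[0])  # rectangular grid assumed; raises on empty input like A
--     total = 0
--     for r in range(m):
--         for c in range(n):
--             for dr, dc in ((0, 1), (0, -1), (1, 0), (-1, 0),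
--                            (1, 1), (-1, -1), (1, -1), (-1, 1)):
--                 er, ec = r + 3 * dr, c + 3 * dc
--                 if 0 <= er < m and 0 <= ec < n and all(
--                         grid[r + k * dr][c + k * dc] == key[k] for k in range(4)):
--                     total += 1
--     return total
-- ===== Notes on version B (the rewrite author's own statement) =====
-- stated objective: faster
-- what changed: B scans every cell once and tests the 8 direction vectors with bounds checks, instead of A's building of row, column and diagonal line strings (with slice copies per position) that are each counted forwards and backwards.
-- outside the precondition, e.g. on solve('AB\nXMASX'): A returns 1, B returns 0; on solve(''): A raises IndexError, B raises IndexError; on solve('XMAS\nXM'): A raises IndexError, B raises IndexError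
import Mathlib
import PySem

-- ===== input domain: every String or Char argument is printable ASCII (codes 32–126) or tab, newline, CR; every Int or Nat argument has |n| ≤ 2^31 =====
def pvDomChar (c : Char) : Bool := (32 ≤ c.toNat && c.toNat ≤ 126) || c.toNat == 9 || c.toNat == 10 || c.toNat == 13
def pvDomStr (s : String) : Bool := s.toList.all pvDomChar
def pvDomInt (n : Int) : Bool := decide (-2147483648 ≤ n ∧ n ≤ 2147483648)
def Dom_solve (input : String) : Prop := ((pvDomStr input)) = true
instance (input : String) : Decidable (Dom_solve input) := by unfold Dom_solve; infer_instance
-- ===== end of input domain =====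

-- B re-implements the word-search count as a single scan over cells x 8 direction
-- vectors with bounds checks, instead of A's construction of row/column/diagonal line
-- strings that are each scanned forwards and backwards (objective: faster, no line copies).

-- ===== PORT A =====
def keyA : List Char := ['X', 'M', 'A', 'S']

-- cnt(s): for i in range(len(s)): if s[i:].startswith(key): result += 1
def cntA (s : List Char) : Int :=
  (PySem.List.pyRange 0 (PySem.List.len s) 1).foldl
    (fun result i =>
      if PySem.Chars.startswith (PySem.List.slice s (some i) none) keyA then result + 1 else result) 0

-- cnt_2dir(row): s = ''.join(row) (row is a list of chars, so s is the same chars); cnt(s) + cnt(s[::-1])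
def cnt2dirA (row : List Char) : Int :=
  cntA row + cntA ((PySem.List.slice? row none none (-1)).getD [])

-- transpose(matrix)
def transposeA (matrix : List (List Char)) : List (List Char) :=
  (PySem.List.pyRange 0 (PySem.List.len (PySem.List.pyGetD matrix 0 [])) 1).foldl
    (fun tmatrix col => tmatrix ++ [matrix.map (fun row => PySem.List.pyGetD row col ' ')]) []

-- diagrow(matrix, sr, sc, to_right): while loop
def diagrowA (matrix : List (List Char)) (sr sc : Int) (toRight : Bool) : List Char :=
  if h : 0 ≤ sr ∧ sr < PySem.List.len matrix ∧ 0 ≤ sc ∧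
      sc < PySem.List.len (PySem.List.pyGetD matrix 0 []) then
    PySem.List.pyGetD (PySem.List.pyGetD matrix sr []) sc ' ' ::
      diagrowA matrix (sr + 1) (if toRight then sc + 1 else sc - 1) toRight
  else []
termination_by (matrix.length - sr.toNat)
decreasing_by simp only [PySem.List.len_eq] at h; omega

def diagrA (matrix : List (List Char)) : List (List Char) :=
  let result := (PySem.List.pyRange 0 (PySem.List.len (PySem.List.pyGetD matrix 0 [])) 1).foldl
    (fun result c => result ++ [diagrowA matrix 0 c true]) []
  (PySem.List.pyRange 1 (PySem.List.len matrix) 1).foldl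
    (fun result r => result ++ [diagrowA matrix r 0 true]) result

def diaglA (matrix : List (List Char)) : List (List Char) :=
  let result := (PySem.List.pyRange 0 (PySem.List.len (PySem.List.pyGetD matrix 0 [])) 1).foldl
    (fun result c => result ++ [diagrowA matrix 0 c false]) []
  (PySem.List.pyRange 1 (PySem.List.len matrix) 1).foldl
    (fun result r =>
      result ++ [diagrowA matrix r (PySem.List.len (PySem.List.pyGetD matrix r []) - 1) false]) result

def solve (input : String) : Int :=
  let matrix : List (List Char) := (PySem.Str.splitlines input).map (fun line => line.toList)
  let result : Int := 0
  let result := result + (matrix.map (fun row => cnt2dirA row)).sum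
  let result := result + ((transposeA matrix).map (fun row => cnt2dirA row)).sum
  let result := result + ((diagrA matrix).map (fun row => cnt2dirA row)).sum
  let result := result + ((diaglA matrix).map (fun row => cnt2dirA row)).sum
  result


-- ===== PORT B =====
def keyB : String := "XMAS"

def dirsB : List (Int × Int) := [(0, 1), (0, -1), (1, 0), (-1, 0), (1, 1), (-1, -1), (1, -1), (-1, 1)]

def hitB (grid : List String) (m n : Int) (r c : Int) (d : Int × Int) : Bool :=
  decide (0 ≤ r + 3 * d.1) && decide (r + 3 * d.1 < m) &&
  decide (0 ≤ c + 3 * d.2) && decide (c + 3 * d.2 < n) &&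
  (PySem.List.pyRange 0 4 1).all (fun k =>
    PySem.Str.pyGet? (PySem.List.pyGetD grid (r + k * d.1) "") (c + k * d.2) ==
      PySem.Str.pyGet? keyB k)

def solve_alt (input : String) : Int :=
  let grid := PySem.Str.splitlines input
  let m := PySem.List.len grid
  let n := PySem.Str.len (PySem.List.pyGetD grid 0 "")
  (PySem.List.pyRange 0 m 1).foldl
    (fun total r =>
      (PySem.List.pyRange 0 n 1).foldl
        (fun total c =>
          dirsB.foldl (fun total d => if hitB grid m n r c d then total + 1 else total) total)
        total)
    0


-- ===== PRECONDITION & SPEC =====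
-- Pre_ excludes inputs on which A raises IndexError (no lines, or a line shorter than the
-- first line) and jagged inputs whose extra characters beyond the first line's length A
-- inspects only for some of the eight directions (an artefact of using len(matrix[0]) as
-- the column count): the function's natural domain is a non-empty rectangular grid.
def Pre_solve (input : String) : Prop :=
  PySem.Str.splitlines input ≠ [] ∧
  ∀ line ∈ PySem.Str.splitlines input,
    line.toList.length = ((PySem.Str.splitlines input).headI).toList.length

instance (input : String) : Decidable (Pre_solve input) := by unfold Pre_solve; infer_instance

def pvWitness_solve : String := "XMAS\nMMAS\nAAAA\nSAMX"

def Spec_solve (input : String) (out : Int) : Prop := out = solve_alt input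
instance (input : String) (out : Int) : Decidable (Spec_solve input out) := by
  unfold Spec_solve; infer_instance

-- ===== CLAIM (what is proved, stated in full; the proofs are below) =====
def Claim_equal_solve : Prop :=
  ∀ (input : String), Dom_solve input → Pre_solve input → Spec_solve input (solve input)

-- ===== LEMMAS AND PROOFS =====
-- ===== proof-side definitions =====
def cellG (L : List (List Char)) (r c : Int) : Option Char :=
  if 0 ≤ r ∧ 0 ≤ c then (L.getD r.toNat [])[c.toNat]? else none

def matchO (F : Int → Option Char) (t s : Int) : Bool :=
  (F t == some 'X') && (F (t + s) == some 'M') && (F (t + 2 * s) == some 'A') &&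
    (F (t + 3 * s) == some 'S')

def cellMatch (L : List (List Char)) (r c u v : Int) : Bool :=
  (cellG L r c == some 'X') && (cellG L (r + u) (c + v) == some 'M') &&
    (cellG L (r + 2 * u) (c + 2 * v) == some 'A') && (cellG L (r + 3 * u) (c + 3 * v) == some 'S')

def NB (L : List (List Char)) (m n : ℕ) (u v : Int) : Int :=
  ∑ r ∈ Finset.range m, ∑ c ∈ Finset.range n, (if cellMatch L (r : Int) (c : Int) u v then (1 : Int) else 0)

-- basic cellG lemmas
lemma cellG_natCast (L : List (List Char)) (r c : ℕ) :
    cellG L (r : Int) (c : Int) = (L.getD r [])[c]? := by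
  simp [cellG]

lemma cellG_neg (L : List (List Char)) (r c : Int) (h : r < 0 ∨ c < 0) :
    cellG L r c = none := by
  unfold cellG; rw [if_neg]; omega

lemma cellG_row_ge (L : List (List Char)) (r c : Int) (h : (L.length : Int) ≤ r) :
    cellG L r c = none := by
  unfold cellG
  split
  · rename_i hp
    rw [List.getD_eq_default]
    · simp
    · omega
  · rfl

lemma cellG_col_ge (L : List (List Char)) (n : ℕ) (hrect : ∀ row ∈ L, row.length = n)
    (r c : Int) (h : (n : Int) ≤ c) : cellG L r c = none := by
  unfold cellG
  split
  · rename_i hp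
    apply List.getElem?_eq_none
    by_cases hr : r.toNat < L.length
    · rw [List.getD_eq_getElem _ _ hr, hrect _ (List.getElem_mem hr)]; omega
    · rw [List.getD_eq_default _ _ (by omega)]; simp
  · rfl

lemma cellG_some_bounds (L : List (List Char)) (n : ℕ) (hrect : ∀ row ∈ L, row.length = n)
    (r c : Int) (ch : Char) (h : cellG L r c = some ch) :
    0 ≤ r ∧ r < L.length ∧ 0 ≤ c ∧ c < n := by
  by_contra hc
  rcases (by omega : r < 0 ∨ c < 0 ∨ (L.length : Int) ≤ r ∨ (n : Int) ≤ c) with h1 | h1 | h1 | h1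
  · rw [cellG_neg _ _ _ (.inl h1)] at h; simp at h
  · rw [cellG_neg _ _ _ (.inr h1)] at h; simp at h
  · rw [cellG_row_ge _ _ _ h1] at h; simp at h
  · rw [cellG_col_ge _ _ hrect _ _ h1] at h; simp at h

lemma prefix4 (l : List Char) (a b c d : Char) :
    ([a, b, c, d] <+: l) ↔
      (l[0]? = some a ∧ l[1]? = some b ∧ l[2]? = some c ∧ l[3]? = some d) := by
  match l with
  | [] => simp
  | [x] => simp
  | [x, y] => simp
  | [x, y, z] => simp
  | x :: y :: z :: w :: t => simp [List.cons_prefix_cons, eq_comm]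

lemma range_sum_eq (n : ℕ) (f : ℕ → ℤ) :
    ((List.range n).map f).sum = ∑ i ∈ Finset.range n, f i := rfl

-- cnt as a sum of forward-match indicators
lemma cntA_eq_sum (l : List Char) (F : Int → Option Char)
    (hF : ∀ i : ℕ, l[i]? = F (i : Int)) :
    cntA l = ∑ i ∈ Finset.range l.length,
      (if matchO F (i : Int) 1 then (1 : Int) else 0) := by
  unfold cntA
  rw [PySem.List.foldl_count_if]
  simp only [PySem.List.len_eq, PySem.List.pyRange_one, Int.sub_zero, Int.toNat_natCast,
    List.countP_map, zero_add]
  rw [← PySem.List.sum_map_ite_one_zero, range_sum_eq]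
  apply Finset.sum_congr rfl
  intro i _
  congr 1
  simp only [Function.comp_apply, PySem.List.slice_from_natCast]
  simp only [matchO, eq_iff_iff, PySem.Chars.startswith_iff, keyA, prefix4,
    List.getElem?_drop, Bool.and_eq_true, beq_iff_eq]
  simp only [Nat.add_zero]
  rw [hF i, hF (i+1), hF (i+2), hF (i+3)]
  push_cast
  tauto

lemma cntA_rev_eq_sum (l : List Char) (F : Int → Option Char)
    (hF : ∀ i : ℕ, l[i]? = F (i : Int)) (hneg : ∀ t : Int, t < 0 → F t = none) :
    cntA l.reverse = ∑ i ∈ Finset.range l.length,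
      (if matchO F (i : Int) (-1) then (1 : Int) else 0) := by
  have hrev : ∀ j : ℕ, l.reverse[j]? = F ((l.length : Int) - 1 - j) := by
    intro j
    by_cases hj : j < l.length
    · rw [List.getElem?_reverse hj, hF (l.length - 1 - j)]
      congr 1
      omega
    · rw [List.getElem?_eq_none (by simpa using by omega), hneg _ (by omega)]
  have := cntA_eq_sum l.reverse (fun t => F ((l.length : Int) - 1 - t)) ?_
  · rw [this, List.length_reverse]
    rw [← Finset.sum_range_reflect (fun i => if matchO F (i : Int) (-1) then (1 : Int) else 0) l.length]
    apply Finset.sum_congr rfl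
    intro j hj
    simp only [Finset.mem_range] at hj
    congr 1
    have harg : ((l.length - 1 - j : ℕ) : Int) = (l.length : Int) - 1 - j := by omega
    simp only [matchO, harg]
    ring_nf
  · intro i
    rw [hrev i]

lemma cnt2dirA_eq_sum (l : List Char) (F : Int → Option Char) (K : ℕ)
    (hF : ∀ i : ℕ, l[i]? = F (i : Int)) (hneg : ∀ t : Int, t < 0 → F t = none)
    (hK : ∀ i : ℕ, K ≤ i → F (i : Int) = none) :
    cnt2dirA l = ∑ i ∈ Finset.range K,
      ((if matchO F (i : Int) 1 then (1 : Int) else 0) +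
       (if matchO F (i : Int) (-1) then (1 : Int) else 0)) := by
  have hzero : ∀ i : ℕ, l.length ≤ i ∨ K ≤ i →
      ((if matchO F (i : Int) 1 then (1 : Int) else 0) +
       (if matchO F (i : Int) (-1) then (1 : Int) else 0)) = 0 := by
    intro i hi
    have hnone : F (i : Int) = none := by
      rcases hi with hi | hi
      · rw [← hF i, List.getElem?_eq_none hi]
      · exact hK i hi
    simp [matchO, hnone]
  have hext : ∀ (g : ℕ → Int), (∀ i : ℕ, l.length ≤ i ∨ K ≤ i → g i = 0) →
      ∑ i ∈ Finset.range l.length, g i = ∑ i ∈ Finset.range K, g i := by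
    intro g hg
    exact (Finset.sum_subset (f := g)
        (by intro x hx; simp at hx ⊢; omega :
          Finset.range l.length ⊆ Finset.range (max l.length K))
        (fun x _ hx => hg x (.inl (by simp at hx; omega)))).trans
      (Finset.sum_subset (f := g)
        (by intro x hx; simp at hx ⊢; omega :
          Finset.range K ⊆ Finset.range (max l.length K))
        (fun x _ hx => hg x (.inr (by simp at hx; omega)))).symm
  unfold cnt2dirA
  rw [PySem.List.slice?_none_none_neg_one]
  simp only [Option.getD_some]
  rw [cntA_eq_sum l F hF, cntA_rev_eq_sum l F hF hneg, ← Finset.sum_add_distrib]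
  exact hext _ hzero

lemma map_sum_eq_range {α : Type} (l : List α) (g : α → ℤ) (d : α) :
    (l.map g).sum = ∑ i ∈ Finset.range l.length, g (l.getD i d) := by
  induction l with
  | nil => simp
  | cons x xs ih =>
    rw [List.map_cons, List.sum_cons, ih, List.length_cons, Finset.sum_range_succ']
    simp [add_comm]

lemma matchO_fam_fwd (L : List (List Char)) (a b u v t : Int) :
    matchO (fun s => cellG L (a + s * u) (b + s * v)) t 1 = cellMatch L (a + t * u) (b + t * v) u v := by
  simp only [matchO, cellMatch]
  ring_nf

lemma matchO_fam_bwd (L : List (List Char)) (a b u v t : Int) :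
    matchO (fun s => cellG L (a + s * u) (b + s * v)) t (-1) =
      cellMatch L (a + t * u) (b + t * v) (-u) (-v) := by
  simp only [matchO, cellMatch]
  ring_nf

lemma fam_line (L : List (List Char)) (l : List Char) (a b u v : Int) (K : ℕ)
    (hF : ∀ i : ℕ, l[i]? = cellG L (a + i * u) (b + i * v))
    (hneg : ∀ t : Int, t < 0 → cellG L (a + t * u) (b + t * v) = none)
    (hK : ∀ i : ℕ, K ≤ i → cellG L (a + i * u) (b + i * v) = none) :
    cnt2dirA l = ∑ i ∈ Finset.range K,
      ((if cellMatch L (a + i * u) (b + i * v) u v then (1 : Int) else 0) +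
       (if cellMatch L (a + i * u) (b + i * v) (-u) (-v) then (1 : Int) else 0)) := by
  rw [cnt2dirA_eq_sum l (fun s => cellG L (a + s * u) (b + s * v)) K hF hneg hK]
  exact Finset.sum_congr rfl fun i _ => by rw [matchO_fam_fwd, matchO_fam_bwd]

lemma famH (L : List (List Char)) (n : ℕ) (hrect : ∀ row ∈ L, row.length = n) :
    (L.map (fun row => cnt2dirA row)).sum = NB L L.length n 0 1 + NB L L.length n 0 (-1) := by
  rw [map_sum_eq_range L _ [], NB, NB, ← Finset.sum_add_distrib]
  apply Finset.sum_congr rfl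
  intro r hr
  simp only [Finset.mem_range] at hr
  have := fam_line L (L.getD r []) (r : Int) 0 0 1 n
    (fun i => by
      rw [(by ring : (r : Int) + i * 0 = (r : Int)), (by ring : (0 : Int) + i * 1 = (i : Int)),
        cellG_natCast])
    (fun t ht => cellG_neg _ _ _ (.inr (by omega)))
    (fun i hi => cellG_col_ge _ _ hrect _ _ (by omega))
  rw [this, ← Finset.sum_add_distrib]
  apply Finset.sum_congr rfl
  intro c _
  have e1 : (r : Int) + c * 0 = r := by ring
  have e2 : (0 : Int) + c * 1 = c := by ring
  rw [e1, e2, neg_zero, (by norm_num : -(1:Int) = (-1 : Int))]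

lemma len_first_row (L : List (List Char)) (n : ℕ) (hne : L ≠ [])
    (hrect : ∀ row ∈ L, row.length = n) :
    PySem.List.len (PySem.List.pyGetD L 0 []) = (n : Int) := by
  cases L with
  | nil => exact absurd rfl hne
  | cons x xs =>
    rw [PySem.List.pyGetD_zero_cons, PySem.List.len_eq, hrect x List.mem_cons_self]

lemma famV (L : List (List Char)) (n : ℕ) (hne : L ≠ [])
    (hrect : ∀ row ∈ L, row.length = n) :
    ((transposeA L).map (fun row => cnt2dirA row)).sum =
      NB L L.length n 1 0 + NB L L.length n (-1) 0 := by
  unfold transposeA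
  rw [PySem.List.foldl_append_singleton_eq_map, List.nil_append, len_first_row L n hne hrect,
    PySem.List.pyRange_one]
  simp only [Int.sub_zero, Int.toNat_natCast, List.map_map]
  rw [range_sum_eq, NB, NB, ← Finset.sum_add_distrib]
  simp only [← Finset.sum_add_distrib]
  rw [Finset.sum_comm]
  apply Finset.sum_congr rfl
  intro c hc
  simp only [Finset.mem_range] at hc
  have := fam_line L (L.map (fun row => PySem.List.pyGetD row (0 + (c : Int)) ' '))
    0 (c : Int) 1 0 L.length
    (fun i => by
      rw [(by ring : (0 : Int) + i * 1 = (i : Int)), (by ring : (c : Int) + i * 0 = (c : Int)),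
        cellG_natCast, List.getElem?_map]
      by_cases hi : i < L.length
      · have hcl : c < (L[i]).length := by rw [hrect _ (List.getElem_mem hi)]; omega
        rw [List.getElem?_eq_getElem hi, List.getD_eq_getElem _ _ hi, Option.map_some,
          List.getElem?_eq_getElem hcl,
          (by push_cast; ring : (0 : Int) + (c : Int) = ((c : ℕ) : Int)),
          PySem.List.pyGetD_natCast, List.getD_eq_getElem _ _ hcl]
      · have h1 : L[i]? = none := List.getElem?_eq_none (by omega)
        have h2 : L.getD i [] = [] := List.getD_eq_default _ _ (by omega)
        rw [h1, h2]
        simp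
    )
    (fun t ht => cellG_neg _ _ _ (.inl (by omega)))
    (fun i hi => cellG_row_ge _ _ _ (by omega))
  simp only [Function.comp_apply]
  rw [this]
  apply Finset.sum_congr rfl
  intro r _
  have e1 : (0 : Int) + r * 1 = r := by ring
  have e2 : (c : Int) + r * 0 = c := by ring
  rw [e1, e2, neg_zero]

lemma cellG_cons_bounds (L : List (List Char)) (n : ℕ) (hrect : ∀ row ∈ L, row.length = n)
    (sr sc : Int) (h1 : 0 ≤ sr) (h2 : sr < L.length) (h3 : 0 ≤ sc) (h4 : sc < n) :
    cellG L sr sc = some (PySem.List.pyGetD (PySem.List.pyGetD L sr []) sc ' ') := by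
  have hr : sr.toNat < L.length := by omega
  have hc : sc.toNat < (L[sr.toNat]).length := by rw [hrect _ (List.getElem_mem hr)]; omega
  have e1 : PySem.List.pyGetD L sr [] = L[sr.toNat] :=
    PySem.List.pyGetD_eq_getElem L [] h1 (by push_cast; omega)
  have e2 : PySem.List.pyGetD L[sr.toNat] sc ' ' = L[sr.toNat][sc.toNat] :=
    PySem.List.pyGetD_eq_getElem L[sr.toNat] ' ' h3 (by push_cast; omega)
  rw [e1, e2]
  unfold cellG
  rw [if_pos ⟨h1, h3⟩, List.getD_eq_getElem _ _ hr, List.getElem?_eq_getElem hc]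

lemma cellG_out (L : List (List Char)) (n : ℕ) (hrect : ∀ row ∈ L, row.length = n)
    (r c : Int) (h : r < 0 ∨ c < 0 ∨ (L.length : Int) ≤ r ∨ (n : Int) ≤ c) :
    cellG L r c = none := by
  rcases h with h | h | h | h
  · exact cellG_neg _ _ _ (.inl h)
  · exact cellG_neg _ _ _ (.inr h)
  · exact cellG_row_ge _ _ _ h
  · exact cellG_col_ge _ _ hrect _ _ h

lemma diagrowA_getElem?_right (L : List (List Char)) (n : ℕ) (hne : L ≠ [])
    (hrect : ∀ row ∈ L, row.length = n) :
    ∀ (i : ℕ) (sr sc : Int), 0 ≤ sr → 0 ≤ sc →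
      (diagrowA L sr sc true)[i]? = cellG L (sr + i) (sc + i) := by
  intro i
  induction i with
  | zero =>
    intro sr sc h1 h2
    rw [diagrowA, len_first_row L n hne hrect]
    simp only [PySem.List.len_eq]
    split
    · rename_i hg
      rw [List.getElem?_cons_zero]
      simp only [Nat.cast_zero, add_zero]
      rw [cellG_cons_bounds L n hrect sr sc (by omega) (by omega) (by omega) (by omega)]
    · rename_i hg
      rw [List.getElem?_nil, cellG_out L n hrect _ _ (by push_cast; omega)]
  | succ i ih =>
    intro sr sc h1 h2
    rw [diagrowA, len_first_row L n hne hrect]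
    simp only [PySem.List.len_eq]
    split
    · rename_i hg
      rw [List.getElem?_cons_succ]
      simp only [if_true]
      rw [ih (sr + 1) (sc + 1) (by omega) (by omega)]
      congr 1 <;> push_cast <;> ring
    · rename_i hg
      rw [List.getElem?_nil, cellG_out L n hrect _ _ (by push_cast; omega)]

lemma diagrowA_getElem?_left (L : List (List Char)) (n : ℕ) (hne : L ≠ [])
    (hrect : ∀ row ∈ L, row.length = n) :
    ∀ (i : ℕ) (sr sc : Int), 0 ≤ sr → sc < n →
      (diagrowA L sr sc false)[i]? = cellG L (sr + i) (sc - i) := by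
  intro i
  induction i with
  | zero =>
    intro sr sc h1 h2
    rw [diagrowA, len_first_row L n hne hrect]
    simp only [PySem.List.len_eq]
    split
    · rename_i hg
      rw [List.getElem?_cons_zero]
      simp only [Nat.cast_zero, add_zero, sub_zero]
      rw [cellG_cons_bounds L n hrect sr sc (by omega) (by omega) (by omega) (by omega)]
    · rename_i hg
      rw [List.getElem?_nil, cellG_out L n hrect _ _ (by push_cast; omega)]
  | succ i ih =>
    intro sr sc h1 h2
    rw [diagrowA, len_first_row L n hne hrect]
    simp only [PySem.List.len_eq]
    split
    · rename_i hg
      rw [List.getElem?_cons_succ]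
      simp only [Bool.false_eq_true, if_false]
      rw [ih (sr + 1) (sc - 1) (by omega) (by omega)]
      congr 1 <;> push_cast <;> ring
    · rename_i hg
      rw [List.getElem?_nil, cellG_out L n hrect _ _ (by push_cast; omega)]

lemma sum_filter_support (s : Finset (ℕ × ℕ)) (p : ℕ × ℕ → Prop) [DecidablePred p]
    (f : ℕ × ℕ → ℤ) (h0 : ∀ a ∈ s, ¬ p a → f a = 0) :
    ∑ x ∈ s, f x = ∑ x ∈ s.filter p, f x := by
  rw [← Finset.sum_filter_add_sum_filter_not s p f]
  have hz : ∑ x ∈ s.filter (fun x => ¬ p x), f x = 0 :=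
    Finset.sum_eq_zero (fun x hx => by
      simp only [Finset.mem_filter] at hx
      exact h0 x hx.1 hx.2)
  rw [hz, add_zero]

lemma diag_ident_right (Q : ℤ → ℤ → ℤ) (m n : ℕ)
    (hQ : ∀ r c : ℤ, r < 0 ∨ (m : ℤ) ≤ r ∨ c < 0 ∨ (n : ℤ) ≤ c → Q r c = 0) :
    (∑ c0 ∈ Finset.range n, ∑ i ∈ Finset.range (m + n), Q (i : ℤ) ((c0 : ℤ) + i)) +
      (∑ r0 ∈ Finset.Ico 1 m, ∑ i ∈ Finset.range (m + n), Q ((r0 : ℤ) + i) (i : ℤ)) =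
    ∑ r ∈ Finset.range m, ∑ c ∈ Finset.range n, Q (r : ℤ) (c : ℤ) := by
  rw [← Finset.sum_product' (Finset.range n) (Finset.range (m + n))
      (fun c0 i => Q (i : ℤ) ((c0 : ℤ) + i)),
    ← Finset.sum_product' (Finset.Ico 1 m) (Finset.range (m + n))
      (fun r0 i => Q ((r0 : ℤ) + i) (i : ℤ)),
    ← Finset.sum_product' (Finset.range m) (Finset.range n) (fun r c => Q (r : ℤ) (c : ℤ))]
  rw [sum_filter_support (Finset.range n ×ˢ Finset.range (m + n))
    (fun p => p.2 < m ∧ p.1 + p.2 < n) _ (fun a _ ha => hQ _ _ (by omega))]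
  rw [sum_filter_support (Finset.Ico 1 m ×ˢ Finset.range (m + n))
    (fun p => p.1 + p.2 < m ∧ p.2 < n) _
    (fun a ha hna => hQ _ _ (by
      simp only [Finset.mem_product, Finset.mem_Ico, Finset.mem_range] at ha
      omega))]
  rw [← Finset.sum_filter_add_sum_filter_not (Finset.range m ×ˢ Finset.range n)
    (fun q => q.1 ≤ q.2) (fun q => Q (q.1 : ℤ) (q.2 : ℤ))]
  congr 1
  · refine Finset.sum_nbij' (fun p => (p.2, p.1 + p.2)) (fun q => (q.2 - q.1, q.1)) ?_ ?_ ?_ ?_ ?_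
    · rintro ⟨x, y⟩ hb
      simp only [Finset.mem_filter, Finset.mem_product, Finset.mem_range, Finset.mem_Ico] at hb ⊢
      omega
    · rintro ⟨x, y⟩ hb
      simp only [Finset.mem_filter, Finset.mem_product, Finset.mem_range, Finset.mem_Ico] at hb ⊢
      omega
    · rintro ⟨x, y⟩ hb
      simp only [Finset.mem_filter, Finset.mem_product, Finset.mem_range, Finset.mem_Ico] at hb
      simp only [Prod.ext_iff]
      constructor <;> dsimp only <;> omega
    · rintro ⟨x, y⟩ hb
      simp only [Finset.mem_filter, Finset.mem_product, Finset.mem_range, Finset.mem_Ico] at hb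
      simp only [Prod.ext_iff]
      constructor <;> dsimp only <;> omega
    · rintro ⟨x, y⟩ hb
      push_cast
      rfl
  · refine Finset.sum_nbij' (fun p => (p.1 + p.2, p.2)) (fun q => (q.1 - q.2, q.2)) ?_ ?_ ?_ ?_ ?_
    · rintro ⟨x, y⟩ hb
      simp only [Finset.mem_filter, Finset.mem_product, Finset.mem_range, Finset.mem_Ico] at hb ⊢
      omega
    · rintro ⟨x, y⟩ hb
      simp only [Finset.mem_filter, Finset.mem_product, Finset.mem_range, Finset.mem_Ico] at hb ⊢
      omega
    · rintro ⟨x, y⟩ hb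
      simp only [Finset.mem_filter, Finset.mem_product, Finset.mem_range, Finset.mem_Ico] at hb
      simp only [Prod.ext_iff]
      constructor <;> dsimp only <;> omega
    · rintro ⟨x, y⟩ hb
      simp only [Finset.mem_filter, Finset.mem_product, Finset.mem_range, Finset.mem_Ico] at hb
      simp only [Prod.ext_iff]
      constructor <;> dsimp only <;> omega
    · rintro ⟨x, y⟩ hb
      push_cast
      rfl

lemma diag_ident_left (Q : ℤ → ℤ → ℤ) (m n : ℕ)
    (hQ : ∀ r c : ℤ, r < 0 ∨ (m : ℤ) ≤ r ∨ c < 0 ∨ (n : ℤ) ≤ c → Q r c = 0) :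
    (∑ c0 ∈ Finset.range n, ∑ i ∈ Finset.range (m + n), Q (i : ℤ) ((c0 : ℤ) - i)) +
      (∑ r0 ∈ Finset.Ico 1 m, ∑ i ∈ Finset.range (m + n), Q ((r0 : ℤ) + i) ((n : ℤ) - 1 - i)) =
    ∑ r ∈ Finset.range m, ∑ c ∈ Finset.range n, Q (r : ℤ) (c : ℤ) := by
  rw [← Finset.sum_product' (Finset.range n) (Finset.range (m + n))
      (fun c0 i => Q (i : ℤ) ((c0 : ℤ) - i)),
    ← Finset.sum_product' (Finset.Ico 1 m) (Finset.range (m + n))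
      (fun r0 i => Q ((r0 : ℤ) + i) ((n : ℤ) - 1 - i)),
    ← Finset.sum_product' (Finset.range m) (Finset.range n) (fun r c => Q (r : ℤ) (c : ℤ))]
  rw [sum_filter_support (Finset.range n ×ˢ Finset.range (m + n))
    (fun p => p.2 < m ∧ p.2 ≤ p.1) _ (fun a _ ha => hQ _ _ (by omega))]
  rw [sum_filter_support (Finset.Ico 1 m ×ˢ Finset.range (m + n))
    (fun p => p.1 + p.2 < m ∧ p.2 < n) _
    (fun a ha hna => hQ _ _ (by
      simp only [Finset.mem_product, Finset.mem_Ico, Finset.mem_range] at ha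
      omega))]
  rw [← Finset.sum_filter_add_sum_filter_not (Finset.range m ×ˢ Finset.range n)
    (fun q => q.1 + q.2 < n) (fun q => Q (q.1 : ℤ) (q.2 : ℤ))]
  congr 1
  · refine Finset.sum_nbij' (fun p => (p.2, p.1 - p.2)) (fun q => (q.1 + q.2, q.1)) ?_ ?_ ?_ ?_ ?_
    · rintro ⟨x, y⟩ hb
      simp only [Finset.mem_filter, Finset.mem_product, Finset.mem_range, Finset.mem_Ico] at hb ⊢
      omega
    · rintro ⟨x, y⟩ hb
      simp only [Finset.mem_filter, Finset.mem_product, Finset.mem_range, Finset.mem_Ico] at hb ⊢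
      omega
    · rintro ⟨x, y⟩ hb
      simp only [Finset.mem_filter, Finset.mem_product, Finset.mem_range, Finset.mem_Ico] at hb
      simp only [Prod.ext_iff]
      constructor <;> dsimp only <;> omega
    · rintro ⟨x, y⟩ hb
      simp only [Finset.mem_filter, Finset.mem_product, Finset.mem_range, Finset.mem_Ico] at hb
      simp only [Prod.ext_iff]
      constructor <;> dsimp only <;> omega
    · rintro ⟨x, y⟩ hb
      simp only [Finset.mem_filter, Finset.mem_product, Finset.mem_range, Finset.mem_Ico] at hb
      rw [show ((x - y : ℕ) : ℤ) = (x : ℤ) - (y : ℤ) from by omega]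
  · refine Finset.sum_nbij' (fun p => (p.1 + p.2, n - 1 - p.2))
      (fun q => (q.1 + q.2 + 1 - n, n - 1 - q.2)) ?_ ?_ ?_ ?_ ?_
    · rintro ⟨x, y⟩ hb
      simp only [Finset.mem_filter, Finset.mem_product, Finset.mem_range, Finset.mem_Ico] at hb ⊢
      omega
    · rintro ⟨x, y⟩ hb
      simp only [Finset.mem_filter, Finset.mem_product, Finset.mem_range, Finset.mem_Ico] at hb ⊢
      omega
    · rintro ⟨x, y⟩ hb
      simp only [Finset.mem_filter, Finset.mem_product, Finset.mem_range, Finset.mem_Ico] at hb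
      simp only [Prod.ext_iff]
      constructor <;> dsimp only <;> omega
    · rintro ⟨x, y⟩ hb
      simp only [Finset.mem_filter, Finset.mem_product, Finset.mem_range, Finset.mem_Ico] at hb
      simp only [Prod.ext_iff]
      constructor <;> dsimp only <;> omega
    · rintro ⟨x, y⟩ hb
      simp only [Finset.mem_filter, Finset.mem_product, Finset.mem_range, Finset.mem_Ico] at hb
      rw [show ((x + y : ℕ) : ℤ) = (x : ℤ) + (y : ℤ) from by omega,
        show ((n - 1 - y : ℕ) : ℤ) = (n : ℤ) - 1 - (y : ℤ) from by omega]

lemma cellMatch_oob (L : List (List Char)) (n : ℕ) (hrect : ∀ row ∈ L, row.length = n)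
    (r c u v : Int) (h : r < 0 ∨ (L.length : Int) ≤ r ∨ c < 0 ∨ (n : Int) ≤ c) :
    cellMatch L r c u v = false := by
  unfold cellMatch
  rw [cellG_out L n hrect r c (by tauto)]
  simp

lemma famDR (L : List (List Char)) (n : ℕ) (hne : L ≠ [])
    (hrect : ∀ row ∈ L, row.length = n) :
    ((diagrA L).map (fun row => cnt2dirA row)).sum =
      NB L L.length n 1 1 + NB L L.length n (-1) (-1) := by
  unfold diagrA
  rw [PySem.List.foldl_append_singleton_eq_map, PySem.List.foldl_append_singleton_eq_map,
    List.nil_append, len_first_row L n hne hrect, PySem.List.len_eq,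
    List.map_append, List.sum_append]
  have h1 : (((PySem.List.pyRange 0 (n : Int) 1).map (fun c => diagrowA L 0 c true)).map
      (fun row => cnt2dirA row)).sum =
      ∑ c0 ∈ Finset.range n, ∑ i ∈ Finset.range (L.length + n),
        ((if cellMatch L (i : Int) ((c0 : Int) + i) 1 1 then (1 : Int) else 0) +
         (if cellMatch L (i : Int) ((c0 : Int) + i) (-1) (-1) then (1 : Int) else 0)) := by
    rw [PySem.List.pyRange_one]
    simp only [Int.sub_zero, Int.toNat_natCast, List.map_map]
    rw [range_sum_eq]
    apply Finset.sum_congr rfl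
    intro c0 hc0
    simp only [Finset.mem_range] at hc0
    simp only [Function.comp_apply]
    have := fam_line L (diagrowA L 0 (0 + (c0 : Int)) true) 0 (c0 : Int) 1 1 (L.length + n)
      (fun i => by
        rw [diagrowA_getElem?_right L n hne hrect i 0 (0 + (c0 : Int)) (by omega) (by omega)]
        congr 1 <;> push_cast <;> ring)
      (fun t ht => cellG_out L n hrect _ _ (by omega))
      (fun i hi => cellG_out L n hrect _ _ (by push_cast; omega))
    rw [this]
    apply Finset.sum_congr rfl
    intro i _
    rw [(by ring : (0 : Int) + i * 1 = (i : Int)), (by ring : (c0 : Int) + i * 1 = (c0 : Int) + i)]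
  have h2 : (((PySem.List.pyRange 1 (L.length : Int) 1).map (fun r => diagrowA L r 0 true)).map
      (fun row => cnt2dirA row)).sum =
      ∑ r0 ∈ Finset.Ico 1 L.length, ∑ i ∈ Finset.range (L.length + n),
        ((if cellMatch L ((r0 : Int) + i) (i : Int) 1 1 then (1 : Int) else 0) +
         (if cellMatch L ((r0 : Int) + i) (i : Int) (-1) (-1) then (1 : Int) else 0)) := by
    rw [PySem.List.pyRange_one]
    simp only [List.map_map]
    rw [range_sum_eq, Finset.sum_Ico_eq_sum_range]
    apply Finset.sum_congr (by congr 1; omega)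
    intro k hk
    simp only [Finset.mem_range] at hk
    simp only [Function.comp_apply]
    have := fam_line L (diagrowA L (1 + (k : Int)) 0 true) (1 + (k : Int)) 0 1 1 (L.length + n)
      (fun i => by
        rw [diagrowA_getElem?_right L n hne hrect i (1 + (k : Int)) 0 (by omega) (by omega)]
        congr 1 <;> push_cast <;> ring)
      (fun t ht => cellG_out L n hrect _ _ (by omega))
      (fun i hi => cellG_out L n hrect _ _ (by push_cast; omega))
    rw [this]
    apply Finset.sum_congr rfl
    intro i _
    rw [(by push_cast; ring : (1 + (k : Int)) + i * 1 = ((1 + k : ℕ) : Int) + i),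
      (by ring : (0 : Int) + i * 1 = (i : Int))]
  rw [h1, h2]
  have := diag_ident_right
    (fun r c => ((if cellMatch L r c 1 1 then (1 : Int) else 0) +
      (if cellMatch L r c (-1) (-1) then (1 : Int) else 0))) L.length n
    (fun r c h => by
      dsimp only
      rw [cellMatch_oob L n hrect r c 1 1 h, cellMatch_oob L n hrect r c (-1) (-1) h]
      simp)
  rw [this, NB, NB, ← Finset.sum_add_distrib]
  simp only [← Finset.sum_add_distrib]

lemma famDL (L : List (List Char)) (n : ℕ) (hne : L ≠ [])
    (hrect : ∀ row ∈ L, row.length = n) :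
    ((diaglA L).map (fun row => cnt2dirA row)).sum =
      NB L L.length n 1 (-1) + NB L L.length n (-1) 1 := by
  unfold diaglA
  rw [PySem.List.foldl_append_singleton_eq_map, PySem.List.foldl_append_singleton_eq_map,
    List.nil_append, len_first_row L n hne hrect, PySem.List.len_eq]
  have emap : List.map (fun r => diagrowA L r (PySem.List.len (PySem.List.pyGetD L r []) - 1) false)
      (PySem.List.pyRange 1 (L.length : Int) 1) =
      List.map (fun r => diagrowA L r ((n : Int) - 1) false)
        (PySem.List.pyRange 1 (L.length : Int) 1) :=
    List.map_congr_left (fun r hr => by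
      rw [PySem.List.mem_pyRange_one] at hr
      have e1 : PySem.List.pyGetD L r [] = L[r.toNat] :=
        PySem.List.pyGetD_eq_getElem L [] (by omega) (by push_cast; omega)
      rw [e1, PySem.List.len_eq, hrect _ (List.getElem_mem (by omega))])
  rw [emap, List.map_append, List.sum_append]
  have h1 : (((PySem.List.pyRange 0 (n : Int) 1).map (fun c => diagrowA L 0 c false)).map
      (fun row => cnt2dirA row)).sum =
      ∑ c0 ∈ Finset.range n, ∑ i ∈ Finset.range (L.length + n),
        ((if cellMatch L (i : Int) ((c0 : Int) - i) 1 (-1) then (1 : Int) else 0) +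
         (if cellMatch L (i : Int) ((c0 : Int) - i) (-1) 1 then (1 : Int) else 0)) := by
    rw [PySem.List.pyRange_one]
    simp only [Int.sub_zero, Int.toNat_natCast, List.map_map]
    rw [range_sum_eq]
    apply Finset.sum_congr rfl
    intro c0 hc0
    simp only [Finset.mem_range] at hc0
    simp only [Function.comp_apply]
    have := fam_line L (diagrowA L 0 (0 + (c0 : Int)) false) 0 (c0 : Int) 1 (-1) (L.length + n)
      (fun i => by
        rw [diagrowA_getElem?_left L n hne hrect i 0 (0 + (c0 : Int)) (by omega) (by omega)]
        congr 1 <;> push_cast <;> ring)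
      (fun t ht => cellG_out L n hrect _ _ (by omega))
      (fun i hi => cellG_out L n hrect _ _ (by push_cast; omega))
    rw [this]
    apply Finset.sum_congr rfl
    intro i _
    rw [(by ring : (0 : Int) + i * 1 = (i : Int)),
      (by ring : (c0 : Int) + i * (-1) = (c0 : Int) - i),
      (by norm_num : -(-1 : Int) = (1 : Int)), (by norm_num : -(1 : Int) = (-1 : Int))]
  have h2 : (((PySem.List.pyRange 1 (L.length : Int) 1).map
      (fun r => diagrowA L r ((n : Int) - 1) false)).map (fun row => cnt2dirA row)).sum =
      ∑ r0 ∈ Finset.Ico 1 L.length, ∑ i ∈ Finset.range (L.length + n),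
        ((if cellMatch L ((r0 : Int) + i) ((n : Int) - 1 - i) 1 (-1) then (1 : Int) else 0) +
         (if cellMatch L ((r0 : Int) + i) ((n : Int) - 1 - i) (-1) 1 then (1 : Int) else 0)) := by
    rw [PySem.List.pyRange_one]
    simp only [List.map_map]
    rw [range_sum_eq, Finset.sum_Ico_eq_sum_range]
    apply Finset.sum_congr (by congr 1; omega)
    intro k hk
    simp only [Finset.mem_range] at hk
    simp only [Function.comp_apply]
    have := fam_line L (diagrowA L (1 + (k : Int)) ((n : Int) - 1) false)
      (1 + (k : Int)) ((n : Int) - 1) 1 (-1) (L.length + n)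
      (fun i => by
        rw [diagrowA_getElem?_left L n hne hrect i (1 + (k : Int)) ((n : Int) - 1)
          (by omega) (by omega)]
        congr 1 <;> push_cast <;> ring)
      (fun t ht => cellG_out L n hrect _ _ (by omega))
      (fun i hi => cellG_out L n hrect _ _ (by push_cast; omega))
    rw [this]
    apply Finset.sum_congr rfl
    intro i _
    rw [(by push_cast; ring : (1 + (k : Int)) + i * 1 = ((1 + k : ℕ) : Int) + i),
      (by ring : ((n : Int) - 1) + i * (-1) = (n : Int) - 1 - i),
      (by norm_num : -(-1 : Int) = (1 : Int)), (by norm_num : -(1 : Int) = (-1 : Int))]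
  rw [h1, h2]
  have := diag_ident_left
    (fun r c => ((if cellMatch L r c 1 (-1) then (1 : Int) else 0) +
      (if cellMatch L r c (-1) 1 then (1 : Int) else 0))) L.length n
    (fun r c h => by
      dsimp only
      rw [cellMatch_oob L n hrect r c 1 (-1) h, cellMatch_oob L n hrect r c (-1) 1 h]
      simp)
  rw [this, NB, NB, ← Finset.sum_add_distrib]
  simp only [← Finset.sum_add_distrib]

lemma accB_eq (grid : List String) (r c : Int) (h0r : 0 ≤ r) (h0c : 0 ≤ c) :
    PySem.Str.pyGet? (PySem.List.pyGetD grid r "") c =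
      cellG (grid.map (fun s => s.toList)) r c := by
  by_cases hr : r < grid.length
  · have e1 : PySem.List.pyGetD grid r "" = grid[r.toNat] :=
      PySem.List.pyGetD_eq_getElem grid "" h0r (by push_cast; omega)
    rw [e1, PySem.Str.pyGet?_eq, PySem.Chars.pyGet?_eq_listPyGet?,
      PySem.List.pyGet?_of_nonneg _ h0c]
    unfold cellG
    rw [if_pos ⟨h0r, h0c⟩, List.getD_eq_getElem _ _ (by simp; omega), List.getElem_map]
  · have e1 : PySem.List.pyGetD grid r "" = "" :=
      PySem.List.pyGetD_of_none grid r "" ((PySem.List.pyGet?_eq_none_iff _ _).2 (by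
        simp [PySem.Raise.InRange]
        omega))
    rw [e1, cellG_row_ge _ _ _ (by simp; omega)]
    simp [PySem.Str.pyGet?_eq, PySem.Chars.pyGet?_eq_listPyGet?,
      PySem.List.pyGet?_eq_none_iff, PySem.Raise.InRange]

lemma hitB_eq (grid : List String) (n : ℕ)
    (hrect : ∀ row ∈ grid.map (fun s => s.toList), row.length = n)
    (r c : ℕ) (hr : r < grid.length) (hc : c < n) (u v : Int)
    (hu : -1 ≤ u ∧ u ≤ 1) (hv : -1 ≤ v ∧ v ≤ 1) :
    hitB grid (grid.length : Int) (n : Int) (r : Int) (c : Int) (u, v) =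
      cellMatch (grid.map (fun s => s.toList)) (r : Int) (c : Int) u v := by
  set L := grid.map (fun s => s.toList) with hL
  have hlen : L.length = grid.length := by simp [hL]
  rw [Bool.eq_iff_iff]
  unfold hitB
  rw [show PySem.List.pyRange 0 4 1 = [0, 1, 2, 3] from rfl]
  simp only [List.all_cons, List.all_nil, Bool.and_eq_true, decide_eq_true_eq, beq_iff_eq,
    Bool.and_true]
  rw [show PySem.Str.pyGet? keyB 0 = some 'X' from rfl,
    show PySem.Str.pyGet? keyB 1 = some 'M' from rfl,
    show PySem.Str.pyGet? keyB 2 = some 'A' from rfl,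
    show PySem.Str.pyGet? keyB 3 = some 'S' from rfl]
  simp only [cellMatch, Bool.and_eq_true, beq_iff_eq]
  constructor
  · rintro ⟨⟨⟨⟨b1, b2⟩, b3⟩, b4⟩, h0, h1, h2, h3⟩
    rw [accB_eq grid _ _ (by omega) (by omega)] at h0
    rw [accB_eq grid _ _ (by omega) (by omega)] at h1
    rw [accB_eq grid _ _ (by omega) (by omega)] at h2
    rw [accB_eq grid _ _ (by omega) (by omega)] at h3
    refine ⟨⟨⟨?_, ?_⟩, ?_⟩, ?_⟩
    · rw [(by ring : (r : Int) + 0 * u = (r : Int)),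
        (by ring : (c : Int) + 0 * v = (c : Int))] at h0
      exact h0
    · rw [(by ring : (r : Int) + 1 * u = (r : Int) + u),
        (by ring : (c : Int) + 1 * v = (c : Int) + v)] at h1
      exact h1
    · exact h2
    · exact h3
  · rintro ⟨⟨⟨h0, h1⟩, h2⟩, h3⟩
    obtain ⟨g1, g2, g3, g4⟩ := cellG_some_bounds L n hrect _ _ _ h3
    obtain ⟨a1, a2, a3, a4⟩ := cellG_some_bounds L n hrect _ _ _ h1
    obtain ⟨e1, e2, e3, e4⟩ := cellG_some_bounds L n hrect _ _ _ h2
    refine ⟨⟨⟨⟨by omega, by omega⟩, by omega⟩, by omega⟩, ?_, ?_, ?_, ?_⟩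
    · rw [accB_eq grid _ _ (by omega) (by omega),
        (by ring : (r : Int) + 0 * u = (r : Int)), (by ring : (c : Int) + 0 * v = (c : Int))]
      exact h0
    · rw [accB_eq grid _ _ (by omega) (by omega),
        (by ring : (r : Int) + 1 * u = (r : Int) + u),
        (by ring : (c : Int) + 1 * v = (c : Int) + v)]
      exact h1
    · rw [accB_eq grid _ _ (by omega) (by omega)]
      exact h2
    · rw [accB_eq grid _ _ (by omega) (by omega)]
      exact h3

lemma foldl_shift {β : Type} (l : List β) (F : Int → β → Int) (g : β → Int)
    (h : ∀ acc x, F acc x = acc + g x) : ∀ a : Int, l.foldl F a = a + (l.map g).sum := by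
  induction l with
  | nil => intro a; simp
  | cons x xs ih =>
    intro a
    rw [List.foldl_cons, h a x, ih, List.map_cons, List.sum_cons, add_assoc]

lemma len_first_row_str (grid : List String) (n : ℕ) (hne : grid ≠ [])
    (hrect : ∀ row ∈ grid.map (fun s => s.toList), row.length = n) :
    PySem.Str.len (PySem.List.pyGetD grid 0 "") = (n : Int) := by
  cases grid with
  | nil => exact absurd rfl hne
  | cons x xs =>
    rw [PySem.List.pyGetD_zero_cons, PySem.Str.len_eq,
      hrect x.toList (by simp)]

lemma gcell_eq (grid : List String) (n : ℕ)
    (hrect : ∀ row ∈ grid.map (fun s => s.toList), row.length = n)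
    (r c : ℕ) (hr : r < grid.length) (hc : c < n) :
    ((List.countP (fun d => hitB grid (grid.length : Int) (n : Int) (r : Int) (c : Int) d)
        dirsB : ℕ) : Int) =
      (if cellMatch (grid.map (fun s => s.toList)) (r : Int) (c : Int) 0 1 then (1 : Int) else 0) +
      (if cellMatch (grid.map (fun s => s.toList)) (r : Int) (c : Int) 0 (-1) then (1 : Int) else 0) +
      (if cellMatch (grid.map (fun s => s.toList)) (r : Int) (c : Int) 1 0 then (1 : Int) else 0) +
      (if cellMatch (grid.map (fun s => s.toList)) (r : Int) (c : Int) (-1) 0 then (1 : Int) else 0) +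
      (if cellMatch (grid.map (fun s => s.toList)) (r : Int) (c : Int) 1 1 then (1 : Int) else 0) +
      (if cellMatch (grid.map (fun s => s.toList)) (r : Int) (c : Int) (-1) (-1) then (1 : Int) else 0) +
      (if cellMatch (grid.map (fun s => s.toList)) (r : Int) (c : Int) 1 (-1) then (1 : Int) else 0) +
      (if cellMatch (grid.map (fun s => s.toList)) (r : Int) (c : Int) (-1) 1 then (1 : Int) else 0) := by
  unfold dirsB
  simp only [List.countP_cons, List.countP_nil]
  rw [hitB_eq grid n hrect r c hr hc 0 1 (by omega) (by omega),
    hitB_eq grid n hrect r c hr hc 0 (-1) (by omega) (by omega),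
    hitB_eq grid n hrect r c hr hc 1 0 (by omega) (by omega),
    hitB_eq grid n hrect r c hr hc (-1) 0 (by omega) (by omega),
    hitB_eq grid n hrect r c hr hc 1 1 (by omega) (by omega),
    hitB_eq grid n hrect r c hr hc (-1) (-1) (by omega) (by omega),
    hitB_eq grid n hrect r c hr hc 1 (-1) (by omega) (by omega),
    hitB_eq grid n hrect r c hr hc (-1) 1 (by omega) (by omega)]
  push_cast
  split_ifs <;> norm_num

lemma solveB_eq (input : String) (n : ℕ) (hne : PySem.Str.splitlines input ≠ [])
    (hrect : ∀ row ∈ (PySem.Str.splitlines input).map (fun s => s.toList), row.length = n) :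
    solve_alt input =
      NB ((PySem.Str.splitlines input).map (fun s => s.toList))
        (PySem.Str.splitlines input).length n 0 1 +
      NB ((PySem.Str.splitlines input).map (fun s => s.toList))
        (PySem.Str.splitlines input).length n 0 (-1) +
      NB ((PySem.Str.splitlines input).map (fun s => s.toList))
        (PySem.Str.splitlines input).length n 1 0 +
      NB ((PySem.Str.splitlines input).map (fun s => s.toList))
        (PySem.Str.splitlines input).length n (-1) 0 +
      NB ((PySem.Str.splitlines input).map (fun s => s.toList))
        (PySem.Str.splitlines input).length n 1 1 +
      NB ((PySem.Str.splitlines input).map (fun s => s.toList))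
        (PySem.Str.splitlines input).length n (-1) (-1) +
      NB ((PySem.Str.splitlines input).map (fun s => s.toList))
        (PySem.Str.splitlines input).length n 1 (-1) +
      NB ((PySem.Str.splitlines input).map (fun s => s.toList))
        (PySem.Str.splitlines input).length n (-1) 1 := by
  set grid := PySem.Str.splitlines input with hg
  set L := grid.map (fun s => s.toList) with hL
  unfold solve_alt
  dsimp only
  rw [← hg, len_first_row_str grid n hne hrect, PySem.List.len_eq]
  rw [foldl_shift _ _ (fun r => ((PySem.List.pyRange 0 (n : Int) 1).map
      (fun c => ((List.countP (fun d => hitB grid (grid.length : Int) (n : Int) r c d)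
        dirsB : ℕ) : Int))).sum)
    (fun acc r => by
      rw [foldl_shift _ _ (fun c => ((List.countP
          (fun d => hitB grid (grid.length : Int) (n : Int) r c d) dirsB : ℕ) : Int))
        (fun acc2 c => by rw [PySem.List.foldl_count_if]) acc])]
  rw [zero_add]
  simp only [PySem.List.pyRange_one, Int.sub_zero, Int.toNat_natCast, List.map_map]
  rw [range_sum_eq, NB, NB, NB, NB, NB, NB, NB, NB]
  simp only [← Finset.sum_add_distrib]
  apply Finset.sum_congr rfl
  intro r hrr
  simp only [Finset.mem_range] at hrr
  simp only [Function.comp_apply, zero_add]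
  rw [range_sum_eq]
  apply Finset.sum_congr rfl
  intro c hcc
  simp only [Finset.mem_range] at hcc
  simp only [Function.comp_apply, zero_add]
  exact gcell_eq grid n hrect r c hrr hcc

lemma solveA_eq (input : String) (n : ℕ) (hne : PySem.Str.splitlines input ≠ [])
    (hrect : ∀ row ∈ (PySem.Str.splitlines input).map (fun line => line.toList),
      row.length = n) :
    solve input =
      NB ((PySem.Str.splitlines input).map (fun line => line.toList))
        (PySem.Str.splitlines input).length n 0 1 +
      NB ((PySem.Str.splitlines input).map (fun line => line.toList))
        (PySem.Str.splitlines input).length n 0 (-1) +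
      NB ((PySem.Str.splitlines input).map (fun line => line.toList))
        (PySem.Str.splitlines input).length n 1 0 +
      NB ((PySem.Str.splitlines input).map (fun line => line.toList))
        (PySem.Str.splitlines input).length n (-1) 0 +
      NB ((PySem.Str.splitlines input).map (fun line => line.toList))
        (PySem.Str.splitlines input).length n 1 1 +
      NB ((PySem.Str.splitlines input).map (fun line => line.toList))
        (PySem.Str.splitlines input).length n (-1) (-1) +
      NB ((PySem.Str.splitlines input).map (fun line => line.toList))
        (PySem.Str.splitlines input).length n 1 (-1) +
      NB ((PySem.Str.splitlines input).map (fun line => line.toList))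
        (PySem.Str.splitlines input).length n (-1) 1 := by
  set L := (PySem.Str.splitlines input).map (fun line => line.toList) with hL
  have hneL : L ≠ [] := by
    rw [hL]
    intro h
    exact hne (List.map_eq_nil_iff.mp h)
  have hlen : L.length = (PySem.Str.splitlines input).length := by rw [hL, List.length_map]
  unfold solve
  dsimp only
  rw [← hL, famH L n hrect, famV L n hneL hrect, famDR L n hneL hrect, famDL L n hneL hrect,
    hlen]
  ring


lemma main_equiv : ∀ input : String, Pre_solve input → solve input = solve_alt input := by
  intro input hpre
  have hrect : ∀ row ∈ (PySem.Str.splitlines input).map (fun line => line.toList),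
      row.length = ((PySem.Str.splitlines input).headI).toList.length := by
    intro row hrow
    obtain ⟨s, hs, rfl⟩ := List.mem_map.mp hrow
    exact hpre.2 s hs
  rw [solveA_eq input _ hpre.1 hrect, solveB_eq input _ hpre.1 hrect]

-- ===== VERDICT (by name: the statement is the Claim_ definition above) =====
theorem solve_spec : Claim_equal_solve := by
  intro input _ hpre
  unfold Spec_solve
  exact main_equiv input hpre
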